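-- pv_equiv track=rewrite | github.com/ctor-777/codewars-exercises | python/complete/diamond.py | give_me_a_diamond
-- ===== SOURCE A (Python) =====
-- def give_me_a_diamond(size):
--     if size % 2 == 0 or size < 1:
--         return None
--
--     diamond = ""
--
--     for i in range(size):
--         if i < size/2:
--             layer = " " * (int(size/ 2) - i) + ("*" + "**" * i) + "\n"
--         else:
--             temp = int(i - (size / 2)) + 1
--                 #^^^^this part augment by 1 starting when the loop arrives
--                 # to the center of the diamond, then in the next line we
--                 # substract this to the size / 2, that gives a descendent
--                 # counter, ideal for the bottom part of the diamond
--             layer = " " * (i - int(size/2)) + ("*" + "**" * (int(size/2) - temp)) + "\n"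
--
--         diamond += layer
--
--     return diamond
-- ===== SOURCE B (Python) =====
-- def give_me_a_diamond(size):
--     if size % 2 == 0 or size < 1:
--         return None
--     h = size // 2
--     top = [" " * (h - i) + "*" * (2 * i + 1) + "\n" for i in range(h + 1)]
--     return "".join(top + top[:-1][::-1])
-- ===== Notes on version B (the rewrite author's own statement) =====
-- stated objective: simpler
-- what changed: Replaces A's single loop over all rows with float-based top/bottom index arithmetic by building only the top half as a list of lines and mirroring it (top + reversed top without the middle row), joined once.
import Mathlib
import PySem

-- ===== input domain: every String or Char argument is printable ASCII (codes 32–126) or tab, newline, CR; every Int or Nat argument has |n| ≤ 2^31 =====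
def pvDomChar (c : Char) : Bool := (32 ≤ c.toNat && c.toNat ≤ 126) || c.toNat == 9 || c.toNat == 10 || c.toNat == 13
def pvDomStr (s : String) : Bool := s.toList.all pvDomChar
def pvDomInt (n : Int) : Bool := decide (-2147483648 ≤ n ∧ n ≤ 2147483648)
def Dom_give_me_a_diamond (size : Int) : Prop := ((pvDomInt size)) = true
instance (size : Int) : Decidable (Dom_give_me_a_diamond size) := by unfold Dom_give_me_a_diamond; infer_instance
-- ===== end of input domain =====

-- B builds only the top half of the diamond as a list of lines and mirrors it,
-- instead of A's single loop over all rows with separate top/bottom index arithmetic.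

-- ===== PORT A =====
-- A computes `size/2` and `i - size/2` with Python float division; for |size| ≤ 2^31 these
-- halves are exact floats, so `int(·)` (truncation toward zero) is exactly `Int.tdiv · 2`
-- and the comparison `i < size/2` is exactly `2*i < size`.  Strings are built on the
-- List Char side (PySem convention) and wrapped with String.ofList at the end.
def give_me_a_diamond (size : Int) : Option String :=
  if PySem.Int.mod size 2 == 0 || size < 1 then none
  else
    some (String.ofList ((PySem.List.pyRange 0 size 1).foldl (fun diamond i =>
      diamond ++
        (if 2 * i < size then
          PySem.List.pyRepeat [' '] (size.tdiv 2 - i) ++ (['*'] ++ PySem.List.pyRepeat ['*', '*'] i) ++ ['\n']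
        else
          let temp := (2 * i - size).tdiv 2 + 1
          PySem.List.pyRepeat [' '] (i - size.tdiv 2) ++ (['*'] ++ PySem.List.pyRepeat ['*', '*'] (size.tdiv 2 - temp)) ++ ['\n'])) []))

-- ===== PORT B =====
-- one line of the top half: ' ' * (h - i) + '*' * (2*i+1) + '\n'
def altLine (h i : Int) : List Char :=
  PySem.List.pyRepeat [' '] (h - i) ++ PySem.List.pyRepeat ['*'] (2 * i + 1) ++ ['\n']

-- top[:-1] is dropLast, [::-1] is reverse, ''.join of char-lists is flatten
def give_me_a_diamond_alt (size : Int) : Option String :=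
  if PySem.Int.mod size 2 == 0 || size < 1 then none
  else
    let h := PySem.Int.floordiv size 2
    let top := (PySem.List.pyRange 0 (h + 1) 1).map (altLine h)
    some (String.ofList ((top ++ top.dropLast.reverse).flatten))

-- ===== PRECONDITION & SPEC =====
def Spec_give_me_a_diamond (size : Int) (out : Option String) : Prop := out = give_me_a_diamond_alt size
instance (size : Int) (out : Option String) : Decidable (Spec_give_me_a_diamond size out) := by unfold Spec_give_me_a_diamond; infer_instance

-- ===== CLAIM (what is proved, stated in full; the proofs are below) =====
def Claim_equal_give_me_a_diamond : Prop := ∀ (size : Int), Dom_give_me_a_diamond size → Spec_give_me_a_diamond size (give_me_a_diamond size)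

-- ===== LEMMAS AND PROOFS =====

theorem flatten_replicate_pair {α : Type} (m : Nat) (a : α) :
    (List.replicate m [a, a]).flatten = List.replicate (2 * m) a := by
  induction m with
  | zero => simp
  | succ k ih =>
    rw [List.replicate_succ, List.flatten_cons, ih,
      show 2 * (k + 1) = (2 * k + 1) + 1 by ring,
      List.replicate_succ, List.replicate_succ]
    simp

theorem pyRepeat_pair {α : Type} (a : α) (n : Int) :
    PySem.List.pyRepeat [a, a] n = List.replicate (2 * n.toNat) a := by
  simp [PySem.List.pyRepeat, flatten_replicate_pair]

-- the star block of A's layer equals B's odd-length star run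
theorem star_block (n : Int) (hn : 0 ≤ n) :
    ['*'] ++ PySem.List.pyRepeat ['*', '*'] n = PySem.List.pyRepeat ['*'] (2 * n + 1) := by
  rw [pyRepeat_pair, PySem.List.pyRepeat_singleton,
    show (2 * n + 1).toNat = 2 * n.toNat + 1 by omega]
  simp [List.replicate_succ]

-- ===== VERDICT (by name: the statement is the Claim_ definition above) =====
theorem give_me_a_diamond_spec : Claim_equal_give_me_a_diamond := by
  intro size _
  unfold Spec_give_me_a_diamond give_me_a_diamond give_me_a_diamond_alt
  by_cases hg : (PySem.Int.mod size 2 == 0 || size < 1) = true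
  · simp only [hg, if_pos]
  · simp only [hg, if_neg, Bool.not_eq_true]
    -- size is odd and ≥ 1
    have hmod : PySem.Int.mod size 2 = size % 2 :=
      PySem.Int.mod_eq_emod_of_pos (by norm_num)
    have hodd : size % 2 = 1 := by
      simp only [Bool.or_eq_true, beq_iff_eq, decide_eq_true_eq, not_or] at hg
      omega
    have hpos : 1 ≤ size := by
      simp only [Bool.or_eq_true, beq_iff_eq, decide_eq_true_eq, not_or] at hg
      omega
    set h : Int := size / 2 with hh
    have hsize : size = 2 * h + 1 := by omega
    have hh0 : 0 ≤ h := by omega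
    have hfl : PySem.Int.floordiv size 2 = h :=
      PySem.Int.floordiv_eq_ediv_of_pos (by norm_num)
    have htd : size.tdiv 2 = h := by
      rw [Int.tdiv_eq_ediv_of_nonneg (by omega)]
    simp only [hfl]
    congr 1
    congr 1
    rw [PySem.List.foldl_append_eq_flatMap, List.nil_append, List.flatMap_eq_foldl]
    rw [← List.flatMap_eq_foldl, List.flatMap_def]
    congr 1
    -- line lists are equal
    rw [PySem.List.pyRange_one_append 0 (h + 1) size (by omega) (by omega), List.map_append]
    have htop : ∀ l : List Int, (∀ i ∈ l, 0 ≤ i ∧ i ≤ h) →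
        l.map (fun i =>
          if 2 * i < size then
            PySem.List.pyRepeat [' '] (size.tdiv 2 - i) ++ (['*'] ++ PySem.List.pyRepeat ['*', '*'] i) ++ ['\n']
          else
            let temp := (2 * i - size).tdiv 2 + 1
            PySem.List.pyRepeat [' '] (i - size.tdiv 2) ++ (['*'] ++ PySem.List.pyRepeat ['*', '*'] (size.tdiv 2 - temp)) ++ ['\n'])
          = l.map (altLine h) := by
      intro l hl
      apply List.map_congr_left
      intro i hi
      obtain ⟨hi0, hih⟩ := hl i hi
      rw [if_pos (by omega), htd, altLine, star_block i hi0]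
    have h1 : (PySem.List.pyRange 0 (h + 1) 1).map (fun i =>
          if 2 * i < size then
            PySem.List.pyRepeat [' '] (size.tdiv 2 - i) ++ (['*'] ++ PySem.List.pyRepeat ['*', '*'] i) ++ ['\n']
          else
            let temp := (2 * i - size).tdiv 2 + 1
            PySem.List.pyRepeat [' '] (i - size.tdiv 2) ++ (['*'] ++ PySem.List.pyRepeat ['*', '*'] (size.tdiv 2 - temp)) ++ ['\n'])
        = (PySem.List.pyRange 0 (h + 1) 1).map (altLine h) := by
      apply htop
      intro i hi
      rw [PySem.List.mem_pyRange_one] at hi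
      omega
    rw [h1]
    congr 1
    -- bottom half: rows h+1 .. 2h equal the reversed top half without the middle row
    have hdl : ((PySem.List.pyRange 0 (h + 1) 1).map (altLine h)).dropLast
        = (PySem.List.pyRange 0 h 1).map (altLine h) := by
      rw [PySem.List.pyRange_one_succ_right (show (0:Int) ≤ h by omega),
        List.map_append, List.map_cons, List.map_nil, List.dropLast_concat]
    rw [hdl]
    apply List.ext_getElem
    · simp [PySem.List.length_pyRange_one]
      omega
    · intro k hk1 hk2
      have hlen : (PySem.List.pyRange (h + 1) size 1).length = h.toNat := by
        rw [PySem.List.length_pyRange_one]; omega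
      have hk : k < h.toNat := by
        rw [List.length_map, hlen] at hk1; exact hk1
      rw [List.getElem_map, List.getElem_reverse, List.getElem_map,
        PySem.List.getElem_pyRange_one, PySem.List.getElem_pyRange_one]
      have hidx : (PySem.List.pyRange 0 h 1).length - 1 - k = h.toNat - 1 - k := by
        rw [PySem.List.length_pyRange_one]; omega
      -- evaluate A's bottom-branch row h+1+k and B's top row h-1-k
      rw [if_neg (by omega)]
      simp only [htd]
      rw [show (2 * (h + 1 + (k : Int)) - size).tdiv 2 = k by
        rw [hsize, show 2 * (h + 1 + (k : Int)) - (2 * h + 1) = 2 * k + 1 by ring,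
          Int.tdiv_eq_ediv_of_nonneg (by omega)]; omega]
      rw [star_block (h - (k + 1)) (by omega), altLine]
      simp only [List.length_map, hidx]
      rw [show ((h.toNat - 1 - k : Nat) : Int) = h - 1 - (k : Int) by omega]
      rw [show h + 1 + (k : Int) - h = h - (0 + (h - 1 - (k : Int))) by ring,
        show 2 * (h - ((k : Int) + 1)) + 1 = 2 * (0 + (h - 1 - (k : Int))) + 1 by ring]
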